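-- pv_equiv track=rewrite | github.com/akavi/nanoGPT | config/face_mdct_config.py | _taxicab_shell_indices
-- ===== SOURCE A (Python) =====
-- def _taxicab_shell_indices(h: int, w: int, boustrophedon: bool = True):
--     """
--     Generate (row, col) indices covering an h×w grid in 'shell' order.
--
--     Shell r consists of all (row, col) with max(row, col) == r, row,col >= 0.
--
--     For boustrophedon=True, the order matches your example:
--
--       r = 0:
--         (0, 0)
--
--       r = 1 (odd):
--         (1, 0), (1, 1), (0, 1)
--
--       r = 2 (even):
--         (0, 2), (1, 2), (2, 2), (2, 1), (2, 0)
--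
--       and so on.
--
--     For boustrophedon=False, every shell is oriented like r=1:
--       start at (r, 0), along row r left→right, then up along col r.
--     """
--
--     max_r = max(h, w) - 1
--     indices: list[tuple[int, int]] = []
--
--     for r in range(max_r + 1):
--         if r == 0:
--             if h > 0 and w > 0:
--                 indices.append((0, 0))
--             continue
--
--         if boustrophedon:
--             if r % 2 == 1:
--                 # odd r: like your r=1 example
--                 pts = []
--                 # bottom edge: (r, 0..r)
--                 for c in range(0, r + 1):
--                     pts.append((r, c))
--                 # right edge: (r-1..0, r)
--                 for i in range(r - 1, -1, -1):
--                     pts.append((i, r))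
--             else:
--                 # even r: like your r=2 example
--                 pts = []
--                 # right edge: (0..r, r)
--                 for i in range(0, r + 1):
--                     pts.append((i, r))
--                 # bottom edge: (r, r-1..0)
--                 for c in range(r - 1, -1, -1):
--                     pts.append((r, c))
--         else:
--             # non-boustrophedon: always like r=1 orientation
--             pts = []
--             # bottom edge: (r, 0..r)
--             for c in range(0, r + 1):
--                 pts.append((r, c))
--             # right edge: (r-1..0, r)
--             for i in range(r - 1, -1, -1):
--                 pts.append((i, r))
--
--         # clip to image bounds
--         for i, j in pts:
--             if 0 <= i < h and 0 <= j < w: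
--                 indices.append((i, j))
--
--     # Optional sanity check:
--     # assert len(indices) == h * w and len(set(indices)) == h * w
--     return indices
-- ===== SOURCE B (Python) =====
-- def _taxicab_shell_indices(h: int, w: int, boustrophedon: bool = True):
--     # Enumerate all grid cells and sort them by a single integer key
--     # r*r + ordinal, where r = max(i, j) is the cell's shell and the
--     # ordinal is its boustrophedon position within shell r.
--     def key(cell):
--         i, j = cell
--         r = max(i, j)
--         if boustrophedon and r % 2 == 0:
--             o = i if j == r else 2 * r - j
--         else:
--             o = j if i == r else 2 * r - i
--         return r * r + o
--
--     return sorted(((i, j) for i in range(h) for j in range(w)), key=key)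
-- ===== Notes on version B (the rewrite author's own statement) =====
-- stated objective: alternative
-- what changed: Replaces the per-shell branch-and-build-then-clip loops by enumerating all h*w cells directly and sorting them with a closed-form integer key r*r + boustrophedon-ordinal.
import Mathlib
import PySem

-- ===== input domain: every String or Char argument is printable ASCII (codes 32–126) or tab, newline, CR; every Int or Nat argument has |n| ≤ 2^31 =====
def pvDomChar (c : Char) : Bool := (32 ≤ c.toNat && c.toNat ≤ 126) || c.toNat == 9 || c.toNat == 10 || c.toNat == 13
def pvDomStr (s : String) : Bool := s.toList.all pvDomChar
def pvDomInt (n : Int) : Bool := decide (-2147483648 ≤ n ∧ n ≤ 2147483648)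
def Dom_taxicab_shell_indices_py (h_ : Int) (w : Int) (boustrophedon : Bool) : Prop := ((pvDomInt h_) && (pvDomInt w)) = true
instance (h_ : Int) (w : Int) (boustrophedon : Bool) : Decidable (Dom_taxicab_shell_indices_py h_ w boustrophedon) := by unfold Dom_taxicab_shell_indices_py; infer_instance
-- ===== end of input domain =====

-- B replaces A's per-shell build-then-clip loops by enumerating all grid cells and
-- sorting them with a closed-form integer key (alternative algorithm, same cost class).

-- ===== PORT A =====
def taxicab_shell_indices_py (h_ : Int) (w : Int) (boustrophedon : Bool) : List (Int × Int) :=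
  let max_r := max h_ w - 1
  (PySem.List.pyRange 0 (max_r + 1) 1).foldl (fun indices r =>
    if r = 0 then
      (if 0 < h_ ∧ 0 < w then indices ++ [((0 : Int), (0 : Int))] else indices)
    else
      let pts : List (Int × Int) :=
        if boustrophedon then
          if PySem.Int.mod r 2 = 1 then
            -- odd r: bottom edge (r, 0..r), then right edge (r-1..0, r)
            let pts0 := (PySem.List.pyRange 0 (r + 1) 1).foldl (fun a c => a ++ [(r, c)]) []
            (PySem.List.pyRange (r - 1) (-1) (-1)).foldl (fun a i => a ++ [(i, r)]) pts0
          else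
            -- even r: right edge (0..r, r), then bottom edge (r, r-1..0)
            let pts0 := (PySem.List.pyRange 0 (r + 1) 1).foldl (fun a i => a ++ [(i, r)]) []
            (PySem.List.pyRange (r - 1) (-1) (-1)).foldl (fun a c => a ++ [(r, c)]) pts0
        else
          let pts0 := (PySem.List.pyRange 0 (r + 1) 1).foldl (fun a c => a ++ [(r, c)]) []
          (PySem.List.pyRange (r - 1) (-1) (-1)).foldl (fun a i => a ++ [(i, r)]) pts0
      -- clip to image bounds
      pts.foldl (fun indices p =>
        if 0 ≤ p.1 ∧ p.1 < h_ ∧ 0 ≤ p.2 ∧ p.2 < w then indices ++ [p] else indices) indices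
  ) []

-- ===== PORT B =====
-- key(cell) = r*r + within-shell boustrophedon ordinal, r = max(i, j)
def pvKeyB (boustrophedon : Bool) (p : Int × Int) : Int :=
  let r := max p.1 p.2
  let o : Int :=
    if boustrophedon = true ∧ PySem.Int.mod r 2 = 0 then
      (if p.2 = r then p.1 else 2 * r - p.2)
    else
      (if p.1 = r then p.2 else 2 * r - p.1)
  r * r + o

def taxicab_shell_indices_py_alt (h_ : Int) (w : Int) (boustrophedon : Bool) : List (Int × Int) :=
  PySem.List.sorted
    ((PySem.List.pyRange 0 h_ 1).flatMap (fun i =>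
      (PySem.List.pyRange 0 w 1).map (fun j => (i, j))))
    (pvKeyB boustrophedon) false

-- ===== PRECONDITION & SPEC =====
def Spec_taxicab_shell_indices_py (h_ : Int) (w : Int) (boustrophedon : Bool) (out : List (Int × Int)) : Prop := out = taxicab_shell_indices_py_alt h_ w boustrophedon
instance (h_ : Int) (w : Int) (boustrophedon : Bool) (out : List (Int × Int)) : Decidable (Spec_taxicab_shell_indices_py h_ w boustrophedon out) := by unfold Spec_taxicab_shell_indices_py; infer_instance

-- ===== CLAIM (what is proved, stated in full; the proofs are below) =====
def Claim_equal_taxicab_shell_indices_py : Prop := ∀ (h_ : Int) (w : Int) (boustrophedon : Bool), Dom_taxicab_shell_indices_py h_ w boustrophedon → Spec_taxicab_shell_indices_py h_ w boustrophedon (taxicab_shell_indices_py h_ w boustrophedon)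

-- ===== LEMMAS AND PROOFS =====

-- the unclipped shell r in "non-boustrophedon" orientation (bottom edge then right edge)
def pvShapeN (r : Int) : List (Int × Int) :=
  (PySem.List.pyRange 0 (r + 1) 1).map (fun c => (r, c)) ++
  (PySem.List.pyRange (r - 1) (-1) (-1)).map (fun i => (i, r))

-- the unclipped shell r in the even-boustrophedon orientation (right edge then bottom edge)
def pvShapeD (r : Int) : List (Int × Int) :=
  (PySem.List.pyRange 0 (r + 1) 1).map (fun i => (i, r)) ++
  (PySem.List.pyRange (r - 1) (-1) (-1)).map (fun c => (r, c))

def pvShape (b : Bool) (r : Int) : List (Int × Int) :=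
  if b = true ∧ PySem.Int.mod r 2 = 0 then pvShapeD r else pvShapeN r

def pvStepA (h_ w : Int) (b : Bool) (r : Int) : List (Int × Int) :=
  if r = 0 then (if 0 < h_ ∧ 0 < w then [((0 : Int), (0 : Int))] else [])
  else (pvShape b r).filter (fun p => decide (0 ≤ p.1 ∧ p.1 < h_ ∧ 0 ≤ p.2 ∧ p.2 < w))

lemma pvStepA_zero (h_ w : Int) (b : Bool) :
    pvStepA h_ w b 0 = (if 0 < h_ ∧ 0 < w then [((0 : Int), (0 : Int))] else []) := by
  simp [pvStepA]

lemma pvA_eq_flatMap (h_ w : Int) (b : Bool) :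
    taxicab_shell_indices_py h_ w b =
      (PySem.List.pyRange 0 (max h_ w) 1).flatMap (pvStepA h_ w b) := by
  simp only [taxicab_shell_indices_py]
  have hflat : (PySem.List.pyRange 0 (max h_ w) 1).flatMap (pvStepA h_ w b)
      = (PySem.List.pyRange 0 (max h_ w) 1).foldl (fun acc r => acc ++ pvStepA h_ w b r) [] := by
    rw [PySem.List.foldl_append_eq_flatMap, List.nil_append]
  rw [show max h_ w - 1 + 1 = max h_ w from by ring, hflat]
  apply PySem.List.foldl_congr_mem
  intro acc r hr
  by_cases h0 : r = 0
  · subst h0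
    rw [pvStepA_zero h_ w b]
    split_ifs <;> simp_all
  · rw [if_neg h0]
    simp only [pvStepA, if_neg h0]
    simp only [PySem.List.foldl_append_singleton_eq_map, List.nil_append,
      PySem.List.foldl_append_ite_eq_filter]
    congr 2
    cases b
    · simp [pvShape, pvShapeN]
    · rcases PySem.Int.mod_two_eq r with hm | hm
      · have hsh : pvShape true r = pvShapeD r := by
          rw [pvShape, if_pos (show true = true ∧ PySem.Int.mod r 2 = 0 from ⟨rfl, hm⟩)]
        rw [if_neg (show ¬ PySem.Int.mod r 2 = 1 from by rw [hm]; decide), hsh, pvShapeD]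
        simp
      · have hsh : pvShape true r = pvShapeN r := by
          rw [pvShape, if_neg (show ¬ (true = true ∧ PySem.Int.mod r 2 = 0) from
            fun hc => by rw [hm] at hc; exact absurd hc.2 (by decide))]
        rw [if_pos hm, hsh, pvShapeN]
        simp

-- key values on the four kinds of shell points
lemma pvKey_bottom {b : Bool} {r : Int} (c : Int) (hcr : c ≤ r)
    (hne : ¬ (b = true ∧ PySem.Int.mod r 2 = 0)) : pvKeyB b (r, c) = r * r + c := by
  simp only [pvKeyB, max_eq_left hcr]
  rw [if_neg hne]
  simp

lemma pvKey_right {b : Bool} {r : Int} (i : Int) (hir : i < r)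
    (hne : ¬ (b = true ∧ PySem.Int.mod r 2 = 0)) : pvKeyB b (i, r) = r * r + (2 * r - i) := by
  simp only [pvKeyB, max_eq_right (le_of_lt hir)]
  rw [if_neg hne, if_neg (by omega)]

lemma pvKey_right_d {b : Bool} {r : Int} (i : Int) (hir : i ≤ r)
    (hd : b = true ∧ PySem.Int.mod r 2 = 0) : pvKeyB b (i, r) = r * r + i := by
  simp only [pvKeyB, max_eq_right hir]
  rw [if_pos hd]
  simp

lemma pvKey_bottom_d {b : Bool} {r : Int} (c : Int) (hcr : c < r)
    (hd : b = true ∧ PySem.Int.mod r 2 = 0) : pvKeyB b (r, c) = r * r + (2 * r - c) := by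
  simp only [pvKeyB, max_eq_left (le_of_lt hcr)]
  rw [if_pos hd, if_neg (by omega)]

lemma pvMap_key_shape (b : Bool) (r : Int) (h1 : 1 ≤ r) :
    (pvShape b r).map (pvKeyB b) = PySem.List.pyRange (r * r) (r * r + (2 * r + 1)) 1 := by
  have hsplit : PySem.List.pyRange (r * r) (r * r + (2 * r + 1)) 1
      = PySem.List.pyRange (r * r) (r * r + (r + 1)) 1 ++
        PySem.List.pyRange (r * r + (r + 1)) (r * r + (2 * r + 1)) 1 := by
    apply PySem.List.pyRange_one_append <;> omega
  have hup : ∀ g : Int → Int × Int, (∀ k : Nat, (k : Int) ≤ r → pvKeyB b (g k) = r * r + k) →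
      (PySem.List.pyRange 0 (r + 1) 1).map (pvKeyB b ∘ g)
        = PySem.List.pyRange (r * r) (r * r + (r + 1)) 1 := by
    intro g hg
    rw [PySem.List.pyRange_one 0 (r + 1), PySem.List.pyRange_one (r * r) (r * r + (r + 1)),
      show r + 1 - 0 = r + 1 from by ring, show r * r + (r + 1) - r * r = r + 1 from by ring,
      List.map_map]
    apply List.map_congr_left
    intro k hk
    have hk' : (k : Int) ≤ r := by
      have := List.mem_range.mp hk; omega
    simp only [Function.comp_apply, zero_add]
    exact hg k hk'
  have hdown : ∀ g : Int → Int × Int, (∀ t : Int, 0 ≤ t → t < r → pvKeyB b (g t) = r * r + (2 * r - t)) →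
      (PySem.List.pyRange (r - 1) (-1) (-1)).map (pvKeyB b ∘ g)
        = PySem.List.pyRange (r * r + (r + 1)) (r * r + (2 * r + 1)) 1 := by
    intro g hg
    rw [PySem.List.pyRange_neg_one (r - 1) (-1), PySem.List.pyRange_one,
      show r - 1 - (-1) = r from by ring, show r * r + (2 * r + 1) - (r * r + (r + 1)) = r from by ring,
      List.map_map]
    apply List.map_congr_left
    intro k hk
    have hk' : (k : Int) < r := by
      have := List.mem_range.mp hk; omega
    simp only [Function.comp_apply]
    rw [hg (r - 1 - k) (by omega) (by omega)]
    ring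
  by_cases hd : b = true ∧ PySem.Int.mod r 2 = 0
  · simp only [pvShape, if_pos hd, pvShapeD, List.map_append, List.map_map, hsplit]
    congr 1
    · exact hup (fun i => (i, r)) (fun k hk => pvKey_right_d (k : Int) hk hd)
    · exact hdown (fun c => (r, c)) (fun t _ ht => pvKey_bottom_d t ht hd)
  · simp only [pvShape, if_neg hd, pvShapeN, List.map_append, List.map_map, hsplit]
    congr 1
    · exact hup (fun c => (r, c)) (fun k hk => pvKey_bottom (k : Int) hk hd)
    · exact hdown (fun i => (i, r)) (fun t _ ht => pvKey_right t ht hd)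

lemma pvKey_bounds {b : Bool} {r : Int} {p : Int × Int} (h1 : 1 ≤ r) (hm : p ∈ pvShape b r) :
    r * r ≤ pvKeyB b p ∧ pvKeyB b p < r * r + (2 * r + 1) := by
  have : pvKeyB b p ∈ (pvShape b r).map (pvKeyB b) := List.mem_map_of_mem hm
  rw [pvMap_key_shape b r h1] at this
  exact PySem.List.mem_pyRange_one.mp this

lemma pvMem_shapeN_iff {r : Int} (p : Int × Int) (h1 : 1 ≤ r) :
    p ∈ pvShapeN r ↔ 0 ≤ p.1 ∧ 0 ≤ p.2 ∧ max p.1 p.2 = r := by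
  obtain ⟨i, j⟩ := p
  simp only [pvShapeN, List.mem_append, List.mem_map, PySem.List.mem_pyRange_one,
    PySem.List.mem_pyRange_neg_one, Prod.mk.injEq]
  constructor
  · rintro (⟨c, ⟨hc0, hc1⟩, rfl, rfl⟩ | ⟨t, ⟨ht1, ht0⟩, rfl, rfl⟩) <;> simp <;> omega
  · rintro ⟨hi, hj, hmax⟩
    by_cases hir : i = r
    · exact Or.inl ⟨j, ⟨by omega, by omega⟩, hir.symm, rfl⟩
    · exact Or.inr ⟨i, ⟨by omega, by omega⟩, rfl, by omega⟩

lemma pvMem_shape_iff {b : Bool} {r : Int} (p : Int × Int) (h1 : 1 ≤ r) :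
    p ∈ pvShape b r ↔ 0 ≤ p.1 ∧ 0 ≤ p.2 ∧ max p.1 p.2 = r := by
  rw [pvShape]
  split_ifs with hd
  · obtain ⟨i, j⟩ := p
    simp only [pvShapeD, List.mem_append, List.mem_map, PySem.List.mem_pyRange_one,
      PySem.List.mem_pyRange_neg_one, Prod.mk.injEq]
    constructor
    · rintro (⟨t, ⟨ht0, ht1⟩, rfl, rfl⟩ | ⟨c, ⟨hc1, hc0⟩, rfl, rfl⟩) <;> simp <;> omega
    · rintro ⟨hi, hj, hmax⟩
      by_cases hjr : j = r
      · exact Or.inl ⟨i, ⟨by omega, by omega⟩, rfl, hjr.symm⟩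
      · exact Or.inr ⟨j, ⟨by omega, by omega⟩, by omega, rfl⟩
  · exact pvMem_shapeN_iff p h1

lemma pvPairwise_step (h_ w : Int) (b : Bool) (r : Int) (hr : 0 ≤ r) :
    (pvStepA h_ w b r).Pairwise (fun p q => pvKeyB b p < pvKeyB b q) := by
  by_cases h0 : r = 0
  · subst h0; rw [pvStepA_zero]; split_ifs <;> simp
  · have h1 : 1 ≤ r := by omega
    rw [pvStepA, if_neg h0]
    apply List.Pairwise.sublist List.filter_sublist
    have : ((pvShape b r).map (pvKeyB b)).Pairwise (· < ·) := by
      rw [pvMap_key_shape b r h1]; exact PySem.List.pairwise_lt_pyRange_one _ _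
    exact List.pairwise_map.mp this

lemma pvKey_zero (b : Bool) : pvKeyB b ((0 : Int), (0 : Int)) = 0 := by
  cases b <;> decide

lemma pvKey_step_bounds {h_ w : Int} {b : Bool} {r : Int} {p : Int × Int}
    (hr : 0 ≤ r) (hm : p ∈ pvStepA h_ w b r) :
    r * r ≤ pvKeyB b p ∧ pvKeyB b p < r * r + (2 * r + 1) := by
  by_cases h0 : r = 0
  · subst h0
    rw [pvStepA_zero] at hm
    split_ifs at hm with hc
    · simp only [List.mem_singleton] at hm
      subst hm
      rw [pvKey_zero]; norm_num
    · simp at hm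
  · have h1 : 1 ≤ r := by omega
    rw [pvStepA, if_neg h0] at hm
    exact pvKey_bounds h1 (List.mem_of_mem_filter hm)

lemma pvPairwise_A (h_ w : Int) (b : Bool) :
    ((PySem.List.pyRange 0 (max h_ w) 1).flatMap (pvStepA h_ w b)).Pairwise
      (fun p q => pvKeyB b p < pvKeyB b q) := by
  rw [List.pairwise_flatMap]
  constructor
  · intro r hr
    exact pvPairwise_step h_ w b r (PySem.List.mem_pyRange_one.mp hr).1
  · apply List.Pairwise.imp_of_mem (l := PySem.List.pyRange 0 (max h_ w) 1)
      (R := (· < ·)) ?_ (PySem.List.pairwise_lt_pyRange_one 0 (max h_ w))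
    intro r1 r2 hm1 hm2 h12 x hx y hy
    have hr1 : 0 ≤ r1 := (PySem.List.mem_pyRange_one.mp hm1).1
    have hr2 : 0 ≤ r2 := (PySem.List.mem_pyRange_one.mp hm2).1
    have hbx := pvKey_step_bounds hr1 hx
    have hby := pvKey_step_bounds hr2 hy
    have hsq : (r1 + 1) * (r1 + 1) ≤ r2 * r2 :=
      mul_le_mul (by omega) (by omega) (by omega) (by omega)
    nlinarith [hbx.2, hby.1]

lemma pvMem_A_iff (h_ w : Int) (b : Bool) (p : Int × Int) :
    p ∈ (PySem.List.pyRange 0 (max h_ w) 1).flatMap (pvStepA h_ w b) ↔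
      0 ≤ p.1 ∧ p.1 < h_ ∧ 0 ≤ p.2 ∧ p.2 < w := by
  simp only [List.mem_flatMap]
  constructor
  · rintro ⟨r, hr, hm⟩
    by_cases h0 : r = 0
    · subst h0
      rw [pvStepA_zero] at hm
      split_ifs at hm with hc
      · simp only [List.mem_singleton] at hm
        subst hm
        simp only
        omega
      · simp at hm
    · rw [pvStepA, if_neg h0] at hm
      exact decide_eq_true_eq.mp (List.mem_filter.mp hm).2
  · intro hb'
    refine ⟨max p.1 p.2, PySem.List.mem_pyRange_one.mpr (by omega), ?_⟩
    by_cases hm0 : max p.1 p.2 = 0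
    · rw [hm0]
      rw [pvStepA_zero, if_pos (by omega : 0 < h_ ∧ 0 < w)]
      have h1 : p.1 = 0 := by omega
      have h2 : p.2 = 0 := by omega
      simp [Prod.ext_iff, h1, h2]
    · have h1 : 1 ≤ max p.1 p.2 := by omega
      rw [pvStepA, if_neg hm0]
      refine List.mem_filter.mpr ⟨(pvMem_shape_iff p h1).mpr ⟨by omega, by omega, rfl⟩, ?_⟩
      exact decide_eq_true_eq.mpr (by omega)

lemma pvMem_cells_iff (h_ w : Int) (p : Int × Int) :
    p ∈ (PySem.List.pyRange 0 h_ 1).flatMap (fun i => (PySem.List.pyRange 0 w 1).map (fun j => (i, j))) ↔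
      0 ≤ p.1 ∧ p.1 < h_ ∧ 0 ≤ p.2 ∧ p.2 < w := by
  obtain ⟨i, j⟩ := p
  simp only [List.mem_flatMap, List.mem_map, PySem.List.mem_pyRange_one, Prod.mk.injEq]
  constructor
  · rintro ⟨a, ha, c, hc, rfl, rfl⟩
    omega
  · rintro ⟨h1', h2', h3', h4'⟩
    exact ⟨i, by omega, j, by omega, rfl, rfl⟩

lemma pvNodup_cells (h_ w : Int) :
    ((PySem.List.pyRange 0 h_ 1).flatMap (fun i => (PySem.List.pyRange 0 w 1).map (fun j => (i, j)))).Nodup := by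
  have hp : ((PySem.List.pyRange 0 h_ 1).flatMap (fun i => (PySem.List.pyRange 0 w 1).map (fun j => (i, j)))).Pairwise
      (fun p q : Int × Int => p.1 < q.1 ∨ (p.1 = q.1 ∧ p.2 < q.2)) := by
    rw [List.pairwise_flatMap]
    constructor
    · intro i _
      rw [List.pairwise_map]
      exact (PySem.List.pairwise_lt_pyRange_one 0 w).imp (fun h => Or.inr ⟨rfl, h⟩)
    · apply List.Pairwise.imp ?_ (PySem.List.pairwise_lt_pyRange_one 0 h_)
      intro a c hac x hx y hy
      simp only [List.mem_map] at hx hy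
      obtain ⟨jx, _, rfl⟩ := hx
      obtain ⟨jy, _, rfl⟩ := hy
      exact Or.inl hac
  refine hp.imp ?_
  intro p q h heq
  subst heq
  rcases h with h | ⟨_, h⟩ <;> omega

-- ===== VERDICT (by name: the statement is the Claim_ definition above) =====
theorem taxicab_shell_indices_py_spec : Claim_equal_taxicab_shell_indices_py := by
  intro h_ w b _
  unfold Spec_taxicab_shell_indices_py taxicab_shell_indices_py_alt
  rw [pvA_eq_flatMap h_ w b]
  apply Eq.symm
  apply PySem.List.sorted_eq_of_perm_of_pairwise_lt
  · have hA := pvPairwise_A h_ w b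
    have hnA : ((PySem.List.pyRange 0 (max h_ w) 1).flatMap (pvStepA h_ w b)).Nodup :=
      hA.imp (fun {p q} hlt => by intro he; subst he; exact lt_irrefl _ hlt)
    refine (List.perm_ext_iff_of_nodup hnA (pvNodup_cells h_ w)).mpr ?_
    intro p
    rw [pvMem_A_iff, pvMem_cells_iff]
  · exact pvPairwise_A h_ w b
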